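-- pv_equiv track=rewrite | github.com/anannyenaik/prosperity-backtester | prosperity_backtester/reports.py | _day_boundary_indices
-- ===== SOURCE A (Python) =====
-- from typing import Dict, List, Sequence
--
-- def _day_boundary_indices(rows: Sequence[Dict[str, object]]) -> set[int]:
--     if not rows:
--         return set()
--     indices = {0, len(rows) - 1}
--     previous_day = rows[0].get("day")
--     for idx, row in enumerate(rows[1:], start=1):
--         current_day = row.get("day")
--         if current_day != previous_day:
--             indices.add(idx - 1)
--             indices.add(idx)
--         previous_day = current_day
--     return indices
-- ===== SOURCE B (Python) =====
-- from typing import Dict, List, Sequence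
--
-- def _day_boundary_indices(rows: Sequence[Dict[str, object]]) -> set[int]:
--     if not rows:
--         return set()
--     indices = {0, len(rows) - 1}
--     days = [row.get("day") for row in rows]
--     offset = 0
--     while days:
--         run = 1
--         while run < len(days) and days[run] == days[0]:
--             run += 1
--         indices.update((offset, offset + run - 1))
--         days = days[run:]
--         offset += run
--     return indices
-- ===== Notes on version B (the rewrite author's own statement) =====
-- stated objective: alternative
-- what changed: Replaces A's single pass that tracks the previous day and adds idx-1/idx at each transition with a run-scanning loop over the precomputed day list that adds each consecutive same-day run's start and end index.
import Mathlib
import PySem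

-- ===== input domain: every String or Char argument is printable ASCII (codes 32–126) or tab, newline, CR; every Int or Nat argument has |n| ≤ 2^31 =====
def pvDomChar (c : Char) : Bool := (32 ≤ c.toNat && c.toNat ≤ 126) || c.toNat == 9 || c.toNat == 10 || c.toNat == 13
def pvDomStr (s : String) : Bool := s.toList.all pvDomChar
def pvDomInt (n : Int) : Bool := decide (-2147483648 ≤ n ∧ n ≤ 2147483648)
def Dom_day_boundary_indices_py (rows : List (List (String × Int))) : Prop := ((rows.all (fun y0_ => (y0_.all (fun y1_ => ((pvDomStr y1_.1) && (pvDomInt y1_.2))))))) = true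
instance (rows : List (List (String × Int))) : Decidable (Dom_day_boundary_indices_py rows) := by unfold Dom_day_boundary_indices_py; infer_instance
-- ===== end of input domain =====

-- B replaces A's neighbour-transition tracking by a run-scanning loop that adds each
-- consecutive same-day run's start and end index (objective: alternative decomposition, same cost).

-- ===== PORT A =====
-- the 'for idx, row in enumerate(rows[1:], start=1)' loop, carrying (idx, previous_day, indices)
def dbLoopA (rows : List (List (String × Int))) (idx : Int) (prev : Option Int)
    (indices : PySem.Set Int) : PySem.Set Int :=
  match rows with
  | [] => indices
  | row :: rest =>
      let currentDay := PySem.Dict.get? (PySem.Dict.mk row) "day"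
      let indices' :=
        if currentDay ≠ prev then PySem.Set.add (PySem.Set.add indices (idx - 1)) idx
        else indices
      dbLoopA rest (idx + 1) currentDay indices'

def day_boundary_indices_py (rows : List (List (String × Int))) : List Int :=
  match rows with
  | [] => PySem.Set.empty
  | r0 :: rest =>
      dbLoopA rest 1 (PySem.Dict.get? (PySem.Dict.mk r0) "day")
        (PySem.Set.ofList [0, ((r0 :: rest).length : Int) - 1])

-- ===== PORT B =====
-- the inner 'while run < len(days) and days[run] == days[0]: run += 1' loop:
-- number of further elements equal to d before the first mismatch
def dbRunLen (days : List (Option Int)) (d0 : Option Int) : Nat :=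
  match days with
  | [] => 0
  | d :: rest => if d == d0 then dbRunLen rest d0 + 1 else 0

-- the outer 'while days:' loop, carrying (days, offset, indices)
def dbRuns (days : List (Option Int)) (offset : Int) (indices : PySem.Set Int) : PySem.Set Int :=
  match days with
  | [] => indices
  | d :: rest =>
      let run : Nat := 1 + dbRunLen rest d
      let indices' := PySem.Set.update indices [offset, offset + (run : Int) - 1]
      dbRuns (rest.drop (run - 1)) (offset + (run : Int)) indices'
termination_by days.length
decreasing_by
  simp only [List.length_drop, List.length_cons]
  omega

def day_boundary_indices_py_alt (rows : List (List (String × Int))) : List Int :=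
  match rows with
  | [] => PySem.Set.empty
  | _ =>
      dbRuns (rows.map (fun row => PySem.Dict.get? (PySem.Dict.mk row) "day")) 0
        (PySem.Set.ofList [0, (rows.length : Int) - 1])

-- ===== PRECONDITION & SPEC =====
def Spec_day_boundary_indices_py (rows : List (List (String × Int))) (out : List Int) : Prop := out = day_boundary_indices_py_alt rows
instance (rows : List (List (String × Int))) (out : List Int) : Decidable (Spec_day_boundary_indices_py rows out) := by unfold Spec_day_boundary_indices_py; infer_instance

-- ===== CLAIM (what is proved, stated in full; the proofs are below) =====
def Claim_equal_day_boundary_indices_py : Prop := ∀ (rows : List (List (String × Int))), Dom_day_boundary_indices_py rows → Spec_day_boundary_indices_py rows (day_boundary_indices_py rows)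

-- ===== LEMMAS AND PROOFS =====

theorem dbRunLen_le (days : List (Option Int)) (d0 : Option Int) :
    dbRunLen days d0 ≤ days.length := by
  induction days with
  | nil => simp [dbRunLen]
  | cons d rest ih => simp only [dbRunLen, List.length_cons]; split <;> omega


-- canonical form both loops reduce to: walk adjacent pairs of the day list,
-- adding both positions of each differing pair
def dbCanon : List (Option Int) → Int → PySem.Set Int → PySem.Set Int
  | [], _, s => s
  | [_], _, s => s
  | a :: b :: rest, t, s =>
      dbCanon (b :: rest) (t + 1) (if b ≠ a then PySem.Set.add (PySem.Set.add s t) (t + 1) else s)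

theorem dbLoopA_eq_canon (rows : List (List (String × Int))) :
    ∀ (idx : Int) (prev : Option Int) (s : PySem.Set Int),
    dbLoopA rows idx prev s
      = dbCanon (prev :: rows.map (fun r => PySem.Dict.get? (PySem.Dict.mk r) "day")) (idx - 1) s := by
  induction rows with
  | nil => intro idx prev s; simp [dbLoopA, dbCanon]
  | cons row rest ih =>
      intro idx prev s
      simp only [dbLoopA, List.map_cons, dbCanon]
      rw [ih]
      have e1 : idx + 1 - 1 = idx := by ring
      have e2 : idx - 1 + 1 = idx := by ring
      rw [e1, e2]

theorem dbCanon_run (rest : List (Option Int)) :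
    ∀ (d : Option Int) (off : Int) (s : PySem.Set Int),
    dbCanon (d :: rest) off s =
      match rest.drop (dbRunLen rest d) with
      | [] => s
      | e :: rest' =>
          dbCanon (e :: rest') (off + (dbRunLen rest d : Int) + 1)
            (PySem.Set.add (PySem.Set.add s (off + (dbRunLen rest d : Int)))
              (off + (dbRunLen rest d : Int) + 1)) := by
  induction rest with
  | nil => intro d off s; simp [dbCanon, dbRunLen]
  | cons e r' ih =>
      intro d off s
      by_cases he : e = d
      · subst he
        have h1 : dbRunLen (e :: r') e = dbRunLen r' e + 1 := by simp [dbRunLen]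
        rw [h1]
        have h2 : dbCanon (e :: e :: r') off s = dbCanon (e :: r') (off + 1) s := by
          simp [dbCanon]
        rw [h2, ih]
        have harith : off + 1 + (dbRunLen r' e : Int) = off + ((dbRunLen r' e + 1 : Nat) : Int) := by
          push_cast; ring
        simp only [List.drop_succ_cons, harith]
      · have h1 : dbRunLen (e :: r') d = 0 := by
          simp [dbRunLen, he]
        rw [h1]
        have h2 : dbCanon (d :: e :: r') off s
            = dbCanon (e :: r') (off + 1) (PySem.Set.add (PySem.Set.add s off) (off + 1)) := by
          simp [dbCanon, he]
        rw [h2]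
        simp

theorem dbRuns_eq_canon (n : Nat) :
    ∀ (d : Option Int) (rest : List (Option Int)) (off : Int) (s : PySem.Set Int),
    rest.length ≤ n →
    (off + (rest.length : Int)) ∈ s →
    dbRuns (d :: rest) off s = dbCanon (d :: rest) off (PySem.Set.add s off) := by
  induction n with
  | zero =>
      intro d rest off s hlen hmem
      have hr : rest = [] := List.eq_nil_of_length_eq_zero (Nat.le_zero.mp hlen)
      subst hr
      simp only [dbRuns, dbRunLen, List.drop_nil]
      simp only [List.length_nil, Nat.cast_zero, add_zero] at hmem
      rw [dbCanon_run]
      simp only [dbRunLen, List.drop_nil]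
      have : PySem.Set.update s [off, off + ((1 : Nat) : Int) - 1] = PySem.Set.add s off := by
        simp only [PySem.Set.update, List.foldl]
        have : off + ((1 : Nat) : Int) - 1 = off := by push_cast; ring
        rw [this, PySem.Set.add_of_mem ((PySem.Set.mem_add _ _ _).mpr (Or.inr rfl))]
      rw [this]
  | succ n ih =>
      intro d rest off s hlen hmem
      rw [dbRuns]
      set m : Nat := dbRunLen rest d with hm
      have hmle : m ≤ rest.length := dbRunLen_le rest d
      have hrun1 : (1 : Nat) + m - 1 = m := by omega
      have hend : off + ((1 + m : Nat) : Int) - 1 = off + (m : Int) := by push_cast; ring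
      have hupd : PySem.Set.update s [off, off + ((1 + m : Nat) : Int) - 1]
          = PySem.Set.add (PySem.Set.add s off) (off + (m : Int)) := by
        simp only [PySem.Set.update, List.foldl, hend]
      rw [hrun1, hupd]
      rcases hdrop : rest.drop m with _ | ⟨e, r'⟩
      · -- last run: it reaches the end of the list
        have hmeq : m = rest.length := by
          have := List.drop_eq_nil_iff.mp hdrop; omega
        have hmemadd : off + (m : Int) ∈ PySem.Set.add s off :=
          (PySem.Set.mem_add _ _ _).mpr (Or.inl (by rwa [hmeq]))
        rw [dbRuns, PySem.Set.add_of_mem hmemadd]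
        rw [dbCanon_run]
        simp only [← hm, hdrop]
      · -- another run follows
        have hlen' : rest.length = m + 1 + r'.length := by
          have := congrArg List.length hdrop
          simp only [List.length_drop, List.length_cons] at this
          omega
        have harith : off + ((1 + m : Nat) : Int) = off + (m : Int) + 1 := by push_cast; ring
        rw [harith]
        have hmem' : (off + (m : Int) + 1) + (r'.length : Int)
            ∈ PySem.Set.add (PySem.Set.add s off) (off + (m : Int)) := by
          apply (PySem.Set.mem_add _ _ _).mpr; left
          apply (PySem.Set.mem_add _ _ _).mpr; left
          have : (off + (m : Int) + 1) + (r'.length : Int) = off + (rest.length : Int) := by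
            rw [hlen']; push_cast; ring
          rwa [this]
        rw [ih e r' (off + (m : Int) + 1) _ (by omega) hmem']
        conv_rhs => rw [dbCanon_run]
        simp only [← hm, hdrop]

-- ===== VERDICT (by name: the statement is the Claim_ definition above) =====
theorem day_boundary_indices_py_spec : Claim_equal_day_boundary_indices_py := by
  intro rows _
  unfold Spec_day_boundary_indices_py day_boundary_indices_py day_boundary_indices_py_alt
  match rows with
  | [] => rfl
  | r0 :: rest =>
      simp only [List.map_cons]
      have hmem0 : (0 : Int) ∈ PySem.Set.ofList [0, ((r0 :: rest).length : Int) - 1] :=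
        (PySem.Set.mem_ofList _ _).mpr (by simp)
      have hmemlast : (0 : Int) + ((rest.map (fun r => PySem.Dict.get? (PySem.Dict.mk r) "day")).length : Int)
          ∈ PySem.Set.ofList [0, ((r0 :: rest).length : Int) - 1] := by
        apply (PySem.Set.mem_ofList _ _).mpr
        simp only [List.length_map, List.length_cons]
        have : (0 : Int) + (rest.length : Int) = ((rest.length + 1 : Nat) : Int) - 1 := by
          push_cast; ring
        rw [this]; simp
      rw [dbRuns_eq_canon (rest.map (fun r => PySem.Dict.get? (PySem.Dict.mk r) "day")).length _ _ _ _ le_rfl hmemlast]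
      rw [PySem.Set.add_of_mem hmem0]
      rw [dbLoopA_eq_canon]
      norm_num
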